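-- pv_equiv track=rewrite | github.com/alfredorusso-github/Makehuman-FaceParametrization | _customTargetService.py | shapekey_is_target
-- ===== SOURCE A (Python) =====
-- _OPPOSITES = [
--     "decr-incr",
--     "down-up",
--     "in-out",
--     "backward-forward",
--     "concave-convex",
--     "compress-uncompress",
--     "square-round",
--     "pointed-triangle"
-- ]
--
-- _ODD_TARGET_NAMES = []
--
-- def shapekey_is_target(shapekey_name):
--     """Guess if shape key is a target based on its name. This will catch the vast majority of all cases, but
--     there are also fringe names and custom target which will not be identified correctly.
--     Unfortunately, custom properties cannot be assigned to shapekeys, so there is no practical way to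
--     store additional metadata about a shapekey."""
--     if not shapekey_name:
--         return False
--     if shapekey_name.lower() == "basis":
--         return False
--     if shapekey_name.startswith("$md"):
--         return True
--     for opposite in _OPPOSITES:
--         if opposite in shapekey_name:
--             return True
--         (low, high) = opposite.split("-")
--         if "-" + low in shapekey_name or "-" + high in shapekey_name:
--             return True
--     # Last resort since this array won't be populated if you load a blend file with previously loaded targets
--     return shapekey_name in _ODD_TARGET_NAMES
-- ===== SOURCE B (Python) =====
-- _OPPOSITES = [
--     "decr-incr",
--     "down-up",
--     "in-out",
--     "backward-forward",
--     "concave-convex",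
--     "compress-uncompress",
--     "square-round",
--     "pointed-triangle"
-- ]
--
-- _ODD_TARGET_NAMES = []
--
-- # The 16 direction words. A name is a target iff it contains '-' immediately
-- # followed by one of them: each A-pattern "-low"/"-high" is exactly that, and
-- # "low-high" itself contains "-high", so the full-pair search is redundant.
-- _WORDS = ["decr", "incr", "down", "up", "in", "out", "backward", "forward",
--           "concave", "convex", "compress", "uncompress", "square", "round",
--           "pointed", "triangle"]
--
--
-- def shapekey_is_target(shapekey_name):
--     if not shapekey_name:
--         return False
--     if shapekey_name.lower() == "basis":
--         return False
--     if shapekey_name.startswith("$md"):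
--         return True
--     # single scan: at every '-' test whether a direction word follows
--     for i, ch in enumerate(shapekey_name):
--         if ch == "-" and any(shapekey_name.startswith(w, i + 1) for w in _WORDS):
--             return True
--     return shapekey_name in _ODD_TARGET_NAMES
-- ===== Notes on version B (the rewrite author's own statement) =====
-- stated objective: alternative
-- what changed: Replaces A's per-pair loop of three substring searches (the full pair plus its two hyphen-prefixed halves) by a single left-to-right scan of the name that, at each hyphen character, tests whether one of the 16 direction words follows; correct because each full pair pattern itself contains the hyphen followed by its second word, so A's condition collapses to a hyphen immediately followed by a direction word.
import Mathlib
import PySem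

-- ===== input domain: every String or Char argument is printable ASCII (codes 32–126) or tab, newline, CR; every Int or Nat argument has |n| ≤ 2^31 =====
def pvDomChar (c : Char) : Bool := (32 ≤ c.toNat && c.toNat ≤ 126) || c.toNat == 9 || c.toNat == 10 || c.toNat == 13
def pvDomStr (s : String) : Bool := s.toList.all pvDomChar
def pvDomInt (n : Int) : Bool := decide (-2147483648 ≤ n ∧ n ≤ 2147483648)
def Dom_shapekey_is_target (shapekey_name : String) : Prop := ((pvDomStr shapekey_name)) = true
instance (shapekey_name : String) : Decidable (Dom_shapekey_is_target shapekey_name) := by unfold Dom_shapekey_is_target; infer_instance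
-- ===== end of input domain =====

-- B replaces A's per-pair triple-substring search by a single scan that at each '-' tests whether a direction word follows (alternative algorithm; equal return value).


-- ===== PORT A =====
def pvOpposites : List String :=
  ["decr-incr", "down-up", "in-out", "backward-forward",
   "concave-convex", "compress-uncompress", "square-round", "pointed-triangle"]

def pvOddTargetNames : List String := []

-- the 'for opposite in _OPPOSITES' loop with its early returns; '"-" + low' is ported
-- by hand as String.ofList ('-' :: low.toList) (exact: prepending one character)
def pvLoopA (name : String) : List String → Bool
  | [] => pvOddTargetNames.contains name
  | opp :: rest =>
    if PySem.Str.isIn opp name then true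
    else
      match PySem.Str.split? opp "-" with
      | some (low :: high :: _) =>
        if PySem.Str.isIn (String.ofList ('-' :: low.toList)) name
            || PySem.Str.isIn (String.ofList ('-' :: high.toList)) name then true
        else pvLoopA name rest
      | _ => pvLoopA name rest

def shapekey_is_target (shapekey_name : String) : Bool :=
  if shapekey_name == "" then false
  else if PySem.Str.lower shapekey_name == "basis" then false
  else if PySem.Str.startswith shapekey_name "$md" then true
  else pvLoopA shapekey_name pvOpposites

-- ===== PORT B =====
def pvWords : List String :=
  ["decr", "incr", "down", "up", "in", "out", "backward", "forward",
   "concave", "convex", "compress", "uncompress", "square", "round",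
   "pointed", "triangle"]

def pvOddTargetNamesB : List String := []

-- the 'for i, ch in enumerate(name)' scan: at each '-' test whether a word follows
-- (name.startswith(w, i+1) is exactly 'w.toList is a prefix of the rest of the scan')
def pvLoopB : List Char → Bool
  | [] => false
  | c :: rest =>
    if c == '-' && pvWords.any (fun w => w.toList.isPrefixOf rest) then true
    else pvLoopB rest

def shapekey_is_target_alt (shapekey_name : String) : Bool :=
  if shapekey_name == "" then false
  else if PySem.Str.lower shapekey_name == "basis" then false
  else if PySem.Str.startswith shapekey_name "$md" then true
  else if pvLoopB shapekey_name.toList then true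
  else pvOddTargetNamesB.contains shapekey_name

-- ===== PRECONDITION & SPEC =====
def Spec_shapekey_is_target (shapekey_name : String) (out : Bool) : Prop := out = shapekey_is_target_alt shapekey_name
instance (shapekey_name : String) (out : Bool) : Decidable (Spec_shapekey_is_target shapekey_name out) := by unfold Spec_shapekey_is_target; infer_instance

-- ===== CLAIM (what is proved, stated in full; the proofs are below) =====
def Claim_equal_shapekey_is_target : Prop := ∀ (shapekey_name : String), Dom_shapekey_is_target shapekey_name → Spec_shapekey_is_target shapekey_name (shapekey_is_target shapekey_name)

-- ===== LEMMAS AND PROOFS =====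

-- B's scan finds exactly the names with some '-'+word as an infix
theorem pvLoopB_iff (l : List Char) :
    pvLoopB l = true ↔ ∃ w ∈ pvWords, ('-' :: w.toList) <:+: l := by
  induction l with
  | nil => simp [pvLoopB]
  | cons c rest ih =>
    simp only [pvLoopB, Bool.if_true_left, Bool.or_eq_true, Bool.and_eq_true,
      List.any_eq_true, beq_iff_eq, List.isPrefixOf_iff_prefix, decide_eq_true_eq, ih]
    constructor
    · rintro (⟨rfl, w, hw, hp⟩ | ⟨w, hw, hi⟩)
      · exact ⟨w, hw, List.infix_cons_iff.2 (Or.inl (List.cons_prefix_cons.2 ⟨rfl, hp⟩))⟩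
      · exact ⟨w, hw, hi.trans ⟨[c], [], by simp⟩⟩
    · rintro ⟨w, hw, hi⟩
      rcases List.infix_cons_iff.1 hi with hp | hi
      · obtain ⟨hc, hp⟩ := List.cons_prefix_cons.1 hp
        exact Or.inl ⟨hc.symm, w, hw, hp⟩
      · exact Or.inr ⟨w, hw, hi⟩

-- absorption: a search for the whole pair "low-high" is subsumed by "-high"
theorem pvAbsorb (name p q r : String) (h : r.toList <:+: p.toList)
    (tail : Bool) :
    (PySem.Str.isIn p name || ((PySem.Str.isIn q name || PySem.Str.isIn r name) || tail))
      = ((PySem.Str.isIn q name || PySem.Str.isIn r name) || tail) := by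
  cases hp : PySem.Str.isIn p name
  · rw [Bool.false_or]
  · have hr : PySem.Str.isIn r name = true :=
      (PySem.Str.isIn_iff_infix r name).2 (h.trans ((PySem.Str.isIn_iff_infix p name).1 hp))
    rw [hr]
    simp

-- A's loop finds exactly the same names
theorem pvLoopA_iff (name : String) :
    pvLoopA name pvOpposites = true ↔ ∃ w ∈ pvWords, ('-' :: w.toList) <:+: name.toList := by
  have h1 : PySem.Str.split? "decr-incr" "-" = some ["decr", "incr"] := by decide
  have h2 : PySem.Str.split? "down-up" "-" = some ["down", "up"] := by decide
  have h3 : PySem.Str.split? "in-out" "-" = some ["in", "out"] := by decide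
  have h4 : PySem.Str.split? "backward-forward" "-" = some ["backward", "forward"] := by decide
  have h5 : PySem.Str.split? "concave-convex" "-" = some ["concave", "convex"] := by decide
  have h6 : PySem.Str.split? "compress-uncompress" "-" = some ["compress", "uncompress"] := by decide
  have h7 : PySem.Str.split? "square-round" "-" = some ["square", "round"] := by decide
  have h8 : PySem.Str.split? "pointed-triangle" "-" = some ["pointed", "triangle"] := by decide
  rw [show pvLoopA name pvOpposites
        = ((PySem.Str.isIn "-decr" name || PySem.Str.isIn "-incr" name)
        || ((PySem.Str.isIn "-down" name || PySem.Str.isIn "-up" name)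
        || ((PySem.Str.isIn "-in" name || PySem.Str.isIn "-out" name)
        || ((PySem.Str.isIn "-backward" name || PySem.Str.isIn "-forward" name)
        || ((PySem.Str.isIn "-concave" name || PySem.Str.isIn "-convex" name)
        || ((PySem.Str.isIn "-compress" name || PySem.Str.isIn "-uncompress" name)
        || ((PySem.Str.isIn "-square" name || PySem.Str.isIn "-round" name)
        || (PySem.Str.isIn "-pointed" name || PySem.Str.isIn "-triangle" name)))))))) from ?_]
  · simp only [Bool.or_eq_true, PySem.Str.isIn_iff_infix]
    constructor
    · rintro ((h|h)|((h|h)|((h|h)|((h|h)|((h|h)|((h|h)|((h|h)|(h|h))))))))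
      · exact ⟨"decr", by simp [pvWords], h⟩
      · exact ⟨"incr", by simp [pvWords], h⟩
      · exact ⟨"down", by simp [pvWords], h⟩
      · exact ⟨"up", by simp [pvWords], h⟩
      · exact ⟨"in", by simp [pvWords], h⟩
      · exact ⟨"out", by simp [pvWords], h⟩
      · exact ⟨"backward", by simp [pvWords], h⟩
      · exact ⟨"forward", by simp [pvWords], h⟩
      · exact ⟨"concave", by simp [pvWords], h⟩
      · exact ⟨"convex", by simp [pvWords], h⟩
      · exact ⟨"compress", by simp [pvWords], h⟩
      · exact ⟨"uncompress", by simp [pvWords], h⟩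
      · exact ⟨"square", by simp [pvWords], h⟩
      · exact ⟨"round", by simp [pvWords], h⟩
      · exact ⟨"pointed", by simp [pvWords], h⟩
      · exact ⟨"triangle", by simp [pvWords], h⟩
    · rintro ⟨w, hw, hi⟩
      simp only [pvWords, List.mem_cons, List.not_mem_nil, or_false] at hw
      rcases hw with rfl|rfl|rfl|rfl|rfl|rfl|rfl|rfl|rfl|rfl|rfl|rfl|rfl|rfl|rfl|rfl <;>
        tauto
  · simp only [pvLoopA, pvOpposites, h1, h2, h3, h4, h5, h6, h7, h8,
      pvOddTargetNames, List.contains_eq_mem, List.not_mem_nil, decide_false,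
      Bool.if_true_left, Bool.or_false, Bool.decide_eq_true]
    rw [show String.ofList ('-' :: "decr".toList) = "-decr" from rfl,
      show String.ofList ('-' :: "incr".toList) = "-incr" from rfl,
      show String.ofList ('-' :: "down".toList) = "-down" from rfl,
      show String.ofList ('-' :: "up".toList) = "-up" from rfl,
      show String.ofList ('-' :: "in".toList) = "-in" from rfl,
      show String.ofList ('-' :: "out".toList) = "-out" from rfl,
      show String.ofList ('-' :: "backward".toList) = "-backward" from rfl,
      show String.ofList ('-' :: "forward".toList) = "-forward" from rfl,
      show String.ofList ('-' :: "concave".toList) = "-concave" from rfl,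
      show String.ofList ('-' :: "convex".toList) = "-convex" from rfl,
      show String.ofList ('-' :: "compress".toList) = "-compress" from rfl,
      show String.ofList ('-' :: "uncompress".toList) = "-uncompress" from rfl,
      show String.ofList ('-' :: "square".toList) = "-square" from rfl,
      show String.ofList ('-' :: "round".toList) = "-round" from rfl,
      show String.ofList ('-' :: "pointed".toList) = "-pointed" from rfl,
      show String.ofList ('-' :: "triangle".toList) = "-triangle" from rfl,
      pvAbsorb name "decr-incr" "-decr" "-incr" (by decide) _,
      pvAbsorb name "down-up" "-down" "-up" (by decide) _,
      pvAbsorb name "in-out" "-in" "-out" (by decide) _,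
      pvAbsorb name "backward-forward" "-backward" "-forward" (by decide) _,
      pvAbsorb name "concave-convex" "-concave" "-convex" (by decide) _,
      pvAbsorb name "compress-uncompress" "-compress" "-uncompress" (by decide) _,
      pvAbsorb name "square-round" "-square" "-round" (by decide) _]
    cases hp : PySem.Str.isIn "pointed-triangle" name
    · rw [Bool.false_or]
    · have hr : PySem.Str.isIn "-triangle" name = true :=
        (PySem.Str.isIn_iff_infix "-triangle" name).2
          ((by decide : ("-triangle".toList : List Char) <:+: "pointed-triangle".toList).trans
            ((PySem.Str.isIn_iff_infix "pointed-triangle" name).1 hp))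
      rw [hr]
      simp

-- the two loops agree as Booleans
theorem pvLoop_eq (name : String) : pvLoopA name pvOpposites = pvLoopB name.toList :=
  Bool.eq_iff_iff.2 ((pvLoopA_iff name).trans (pvLoopB_iff name.toList).symm)

-- ===== VERDICT (by name: the statement is the Claim_ definition above) =====
theorem shapekey_is_target_spec : Claim_equal_shapekey_is_target := by
  intro name _
  unfold Spec_shapekey_is_target shapekey_is_target shapekey_is_target_alt
  by_cases h0 : name == ""
  · simp [h0]
  · by_cases hb : PySem.Str.lower name == "basis"
    · simp [h0, hb]
    · simp [h0, hb, pvLoop_eq, pvOddTargetNamesB]
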